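-- pv_equiv track=rewrite | github.com/automatesecurity/masat | utils/diffing.py | diff_findings
-- ===== SOURCE A (Python) =====
-- from typing import Any, Iterable
--
-- def _finding_key(f: dict[str, Any]) -> tuple[str, str, str]:
--     # Use stable keys; tolerate schema changes.
--     asset = str(f.get("asset", ""))
--     category = str(f.get("category", ""))
--     title = str(f.get("title", ""))
--     return (asset, category, title)
--
-- def diff_findings(old: Iterable[dict[str, Any]], new: Iterable[dict[str, Any]]) -> tuple[list[dict[str, Any]], list[dict[str, Any]]]:
--     old_map = {_finding_key(f): f for f in (old or [])}
--     new_map = {_finding_key(f): f for f in (new or [])}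
--
--     new_keys = set(new_map.keys())
--     old_keys = set(old_map.keys())
--
--     added = [new_map[k] for k in sorted(new_keys - old_keys)]
--     resolved = [old_map[k] for k in sorted(old_keys - new_keys)]
--     return added, resolved
-- ===== SOURCE B (Python) =====
-- def _finding_key(f):
--     return (str(f.get("asset", "")), str(f.get("category", "")), str(f.get("title", "")))
--
-- def diff_findings(old, new):
--     # Build the maps as A does (last duplicate key wins), then a two-pointer
--     # merge over the two sorted key lists instead of set differences.
--     old_map = {_finding_key(f): f for f in (old or [])}
--     new_map = {_finding_key(f): f for f in (new or [])}
--     nk = sorted(new_map.keys())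
--     ok = sorted(old_map.keys())
--     added, resolved = [], []
--     i = j = 0
--     while i < len(nk) and j < len(ok):
--         if nk[i] == ok[j]:
--             i += 1
--             j += 1
--         elif nk[i] < ok[j]:
--             added.append(new_map[nk[i]])
--             i += 1
--         else:
--             resolved.append(old_map[ok[j]])
--             j += 1
--     while i < len(nk):
--         added.append(new_map[nk[i]])
--         i += 1
--     while j < len(ok):
--         resolved.append(old_map[ok[j]])
--         j += 1
--     return added, resolved
-- ===== Notes on version B (the rewrite author's own statement) =====
-- stated objective: alternative
-- what changed: B keeps A's key-maps but replaces the two set differences followed by two sorts of the difference sets with a single two-pointer merge over the two sorted unique-key lists, emitting added/resolved in one synchronized pass.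
import Mathlib
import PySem

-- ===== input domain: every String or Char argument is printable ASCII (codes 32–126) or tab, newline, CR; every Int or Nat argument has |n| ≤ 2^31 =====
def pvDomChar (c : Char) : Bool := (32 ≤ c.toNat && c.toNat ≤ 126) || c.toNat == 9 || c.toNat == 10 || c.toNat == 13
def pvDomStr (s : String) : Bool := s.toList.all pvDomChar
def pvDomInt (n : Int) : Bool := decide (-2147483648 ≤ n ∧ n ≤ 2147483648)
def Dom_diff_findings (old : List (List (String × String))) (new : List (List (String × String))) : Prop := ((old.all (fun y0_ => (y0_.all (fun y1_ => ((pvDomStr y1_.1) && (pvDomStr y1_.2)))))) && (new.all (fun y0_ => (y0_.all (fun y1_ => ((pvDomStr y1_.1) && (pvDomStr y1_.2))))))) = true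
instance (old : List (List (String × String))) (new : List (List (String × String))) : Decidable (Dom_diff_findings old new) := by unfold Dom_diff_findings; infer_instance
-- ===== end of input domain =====

-- B replaces A's two set-differences + two sorts by one two-pointer merge over the two sorted
-- unique-key lists (alternative decomposition, same exact results).

-- ===== PORT A =====

-- _finding_key(f): the (asset, category, title) triple, missing keys default to "".
def findingKey (f : List (String × String)) : String × String × String :=
  ((PySem.Dict.mk f).getD "asset" "",
   ((PySem.Dict.mk f).getD "category" "", (PySem.Dict.mk f).getD "title" ""))

-- Python's ordering on (str, str, str) tuples: lexicographic.
def lexKey (k : String × String × String) : Lex (String × Lex (String × String)) :=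
  toLex (k.1, toLex k.2)

def diff_findings (old : List (List (String × String))) (new : List (List (String × String))) : (List (List (String × String))) × (List (List (String × String))) :=
  let old_map := old.foldl (fun d f => d.insert (findingKey f) f) PySem.Dict.empty
  let new_map := new.foldl (fun d f => d.insert (findingKey f) f) PySem.Dict.empty
  let new_keys := PySem.Set.ofList new_map.keys
  let old_keys := PySem.Set.ofList old_map.keys
  let added := (PySem.List.sorted (PySem.Set.diff new_keys old_keys) lexKey).map
      (fun k => new_map.getD k [])
  let resolved := (PySem.List.sorted (PySem.Set.diff old_keys new_keys) lexKey).map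
      (fun k => old_map.getD k [])
  (added, resolved)

-- ===== PORT B =====
-- the two-pointer while-loop of Source B as structural recursion on the two sorted key lists
def mergeDiff (nm om : PySem.Dict (String × String × String) (List (String × String))) :
    List (String × String × String) → List (String × String × String) →
    (List (List (String × String))) × (List (List (String × String)))
  | [], ok => ([], ok.map (fun k => om.getD k []))
  | a :: nk, [] => ((a :: nk).map (fun k => nm.getD k []), [])
  | a :: nk, b :: ok =>
    if a == b then mergeDiff nm om nk ok
    else if lexKey a < lexKey b then
      let r := mergeDiff nm om nk (b :: ok)
      (nm.getD a [] :: r.1, r.2)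
    else
      let r := mergeDiff nm om (a :: nk) ok
      (r.1, om.getD b [] :: r.2)

def diff_findings_alt (old : List (List (String × String))) (new : List (List (String × String))) : (List (List (String × String))) × (List (List (String × String))) :=
  let old_map := old.foldl (fun d f => d.insert (findingKey f) f) PySem.Dict.empty
  let new_map := new.foldl (fun d f => d.insert (findingKey f) f) PySem.Dict.empty
  let nk := PySem.List.sorted new_map.keys lexKey
  let ok := PySem.List.sorted old_map.keys lexKey
  mergeDiff new_map old_map nk ok

-- ===== PRECONDITION & SPEC =====
def Spec_diff_findings (old : List (List (String × String))) (new : List (List (String × String))) (out : (List (List (String × String))) × (List (List (String × String)))) : Prop := out = diff_findings_alt old new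
instance (old : List (List (String × String))) (new : List (List (String × String))) (out : (List (List (String × String))) × (List (List (String × String)))) : Decidable (Spec_diff_findings old new out) := by unfold Spec_diff_findings; infer_instance

-- ===== CLAIM (what is proved, stated in full; the proofs are below) =====
def Claim_equal_diff_findings : Prop := ∀ (old : List (List (String × String))) (new : List (List (String × String))), Dom_diff_findings old new → Spec_diff_findings old new (diff_findings old new)

-- ===== LEMMAS AND PROOFS =====

theorem lexKey_inj {a b : String × String × String} (h : lexKey a = lexKey b) : a = b := by
  rcases a with ⟨a1, a2, a3⟩; rcases b with ⟨b1, b2, b3⟩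
  simpa [lexKey, Prod.ext_iff] using h

theorem strict_pairwise_sorted (xs : List (String × String × String)) (hx : xs.Nodup) :
    (PySem.List.sorted xs lexKey).Pairwise (fun a b => lexKey a < lexKey b) := by
  have hperm := PySem.List.sorted_perm xs lexKey false
  have hnd : (PySem.List.sorted xs lexKey).Nodup := hperm.nodup_iff.mpr hx
  have hle := PySem.List.sorted_pairwise xs lexKey
  exact (hle.and hnd).imp (fun {a b} h => lt_of_le_of_ne h.1 (fun e => h.2 (lexKey_inj e)))

-- sorting commutes with filtering (keys are distinct, lexKey is injective)
theorem sorted_filter_comm (xs : List (String × String × String))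
    (p : (String × String × String) → Bool) (hx : xs.Nodup) :
    PySem.List.sorted (xs.filter p) lexKey = (PySem.List.sorted xs lexKey).filter p := by
  apply PySem.List.sorted_eq_of_perm_of_pairwise_lt
  · exact (PySem.List.sorted_perm xs lexKey false).filter p
  · exact (strict_pairwise_sorted xs hx).sublist List.filter_sublist

-- the merge over two strictly key-sorted lists computes exactly the two filtered difference lists
theorem mergeDiff_spec (nm om : PySem.Dict (String × String × String) (List (String × String)))
    (nk ok : List (String × String × String))
    (hn : nk.Pairwise (fun a b => lexKey a < lexKey b))
    (ho : ok.Pairwise (fun a b => lexKey a < lexKey b)) :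
    mergeDiff nm om nk ok =
      ((nk.filter (fun k => !ok.contains k)).map (fun k => nm.getD k []),
       (ok.filter (fun k => !nk.contains k)).map (fun k => om.getD k [])) := by
  fun_induction mergeDiff nm om nk ok with
  | case1 ok => simp
  | case2 a nk => simp
  | case3 a nk b ok hab ih =>
    have hb : a = b := eq_of_beq hab
    subst hb
    rcases List.pairwise_cons.mp hn with ⟨ha, hn'⟩
    rcases List.pairwise_cons.mp ho with ⟨hbo, ho'⟩
    rw [ih hn' ho']
    have e1 : (a :: nk).filter (fun k => !(a :: ok).contains k)
        = nk.filter (fun k => !ok.contains k) := by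
      have hc : ∀ x ∈ nk, (!(a :: ok).contains x) = (!ok.contains x) := by
        intro x hx
        have hne : a ≠ x := fun e => absurd (e ▸ ha x hx) (lt_irrefl _)
        simp [Ne.symm hne]
      have h0 : (!(a :: ok).contains a) = false := by simp
      rw [List.filter_cons, h0, if_neg Bool.false_ne_true, List.filter_congr hc]
    have e2 : (a :: ok).filter (fun k => !(a :: nk).contains k)
        = ok.filter (fun k => !nk.contains k) := by
      have hc : ∀ x ∈ ok, (!(a :: nk).contains x) = (!nk.contains x) := by
        intro x hx
        have hne : a ≠ x := fun e => absurd (e ▸ hbo x hx) (lt_irrefl _)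
        simp [Ne.symm hne]
      have h0 : (!(a :: nk).contains a) = false := by simp
      rw [List.filter_cons, h0, if_neg Bool.false_ne_true, List.filter_congr hc]
    rw [e1, e2]
  | case4 a nk b ok hab hlt r ih =>
    rcases List.pairwise_cons.mp hn with ⟨ha, hn'⟩
    have hanb : a ∉ b :: ok := by
      intro hmem
      rcases List.mem_cons.mp hmem with e | hmem
      · rw [e] at hlt; exact lt_irrefl _ hlt
      · exact absurd (lt_trans hlt ((List.pairwise_cons.mp ho).1 a hmem)) (lt_irrefl _)
    have e1 : (a :: nk).filter (fun k => !(b :: ok).contains k)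
        = a :: nk.filter (fun k => !(b :: ok).contains k) := by
      have h0 : (!(b :: ok).contains a) = true := by simp [hanb]
      rw [List.filter_cons, h0, if_pos rfl]
    have e2 : (b :: ok).filter (fun k => !(a :: nk).contains k)
        = (b :: ok).filter (fun k => !nk.contains k) := by
      apply List.filter_congr
      intro x hx
      have hne : a ≠ x := fun e => hanb (e ▸ hx)
      simp [Ne.symm hne]
    have hr : r = (List.map (fun k => nm.getD k []) (List.filter (fun k => !(b :: ok).contains k) nk),
          List.map (fun k => om.getD k []) (List.filter (fun k => !nk.contains k) (b :: ok))) := ih hn' ho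
    rw [e1, e2, hr]; simp
  | case5 a nk b ok hab hlt r ih =>
    rcases List.pairwise_cons.mp ho with ⟨hbo, ho'⟩
    have hne : a ≠ b := by intro e; subst e; exact hab (beq_self_eq_true a)
    have hblt : lexKey b < lexKey a :=
      lt_of_le_of_ne (not_lt.mp hlt) (fun e => hne (lexKey_inj e).symm)
    have hbna : b ∉ a :: nk := by
      intro hmem
      rcases List.mem_cons.mp hmem with e | hmem
      · rw [e] at hblt; exact lt_irrefl _ hblt
      · exact absurd (lt_trans hblt ((List.pairwise_cons.mp hn).1 b hmem)) (lt_irrefl _)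
    have e1 : (a :: nk).filter (fun k => !(b :: ok).contains k)
        = (a :: nk).filter (fun k => !ok.contains k) := by
      apply List.filter_congr
      intro x hx
      have hxb : b ≠ x := fun e => hbna (e ▸ hx)
      simp [Ne.symm hxb]
    have e2 : (b :: ok).filter (fun k => !(a :: nk).contains k)
        = b :: ok.filter (fun k => !(a :: nk).contains k) := by
      have h0 : (!(a :: nk).contains b) = true := by simp [hbna]
      rw [List.filter_cons, h0, if_pos rfl]
    have hr : r = (List.map (fun k => nm.getD k []) (List.filter (fun k => !ok.contains k) (a :: nk)),
          List.map (fun k => om.getD k []) (List.filter (fun k => !(a :: nk).contains k) ok)) := ih hn ho'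
    rw [e1, e2, hr]; simp

-- ===== VERDICT (by name: the statement is the Claim_ definition above) =====
theorem diff_findings_spec : Claim_equal_diff_findings := by
  intro old new _
  unfold Spec_diff_findings diff_findings diff_findings_alt
  dsimp only
  set om := old.foldl (fun d f => d.insert (findingKey f) f) PySem.Dict.empty with hom
  set nm := new.foldl (fun d f => d.insert (findingKey f) f) PySem.Dict.empty with hnm
  have hnodO : om.keys.Nodup := by
    rw [hom]
    exact PySem.Dict.nodup_keys_foldl_insert_key old findingKey (fun _ f => f) _ (by simp [PySem.Dict.empty])
  have hnodN : nm.keys.Nodup := by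
    rw [hnm]
    exact PySem.Dict.nodup_keys_foldl_insert_key new findingKey (fun _ f => f) _ (by simp [PySem.Dict.empty])
  rw [mergeDiff_spec _ _ _ _ (strict_pairwise_sorted _ hnodN) (strict_pairwise_sorted _ hnodO)]
  have hc1 : ∀ k ∈ PySem.List.sorted nm.keys lexKey,
      (!(PySem.List.sorted om.keys lexKey).contains k) = (!om.keys.contains k) := by
    intro k _; simp [PySem.List.mem_sorted]
  have hc2 : ∀ k ∈ PySem.List.sorted om.keys lexKey,
      (!(PySem.List.sorted nm.keys lexKey).contains k) = (!nm.keys.contains k) := by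
    intro k _; simp [PySem.List.mem_sorted]
  rw [List.filter_congr hc1, List.filter_congr hc2]
  simp only [PySem.Set.diff, PySem.Set.ofList_eq_self_of_nodup _ hnodN,
    PySem.Set.ofList_eq_self_of_nodup _ hnodO]
  rw [sorted_filter_comm _ _ hnodN, sorted_filter_comm _ _ hnodO]
  simp only [PySem.Set.contains_eq_listContains]
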